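-- pv_equiv track=rewrite | github.com/Sayantan0008/NewsBite | model/summarizer.py | process_summaries
-- ===== SOURCE A (Python) =====
-- def process_summaries(summaries, valid_texts, original_texts, skip_indices):
--     """
--     Process generated summaries and reinsert them into the original text order
--
--     Args:
--         summaries (list): List of generated summaries for valid texts
--         valid_texts (list): List of valid texts that were summarized
--         original_texts (list): Original list of texts including skipped ones
--         skip_indices (list): Indices of texts that were skipped
--
--     Returns:
--         list: List of summaries in the original order
--     """
--     # Initialize result list with empty strings
--     result = [""] * len(original_texts)
--
--     # Process each summary
--     valid_idx = 0
--     for i in range(len(original_texts)):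
--         if i in skip_indices:
--             # Skip indices get empty summaries
--             continue
--         else:
--             if valid_idx < len(summaries):
--                 summary = summaries[valid_idx]
--
--                 # Ensure summary is properly formatted
--                 if summary:
--                     # Ensure summary ends with a period
--                     if not summary.endswith('.'):
--                         summary = summary + '.'
--                     # Ensure summary starts with a capital letter
--                     if not summary[0].isupper():
--                         summary = summary[0].upper() + summary[1:]
--
--                 result[i] = summary
--                 valid_idx += 1
--
--     return result
-- ===== SOURCE B (Python) =====
-- def process_summaries(summaries, valid_texts, original_texts, skip_indices):
--     def entry(i):
--         if i in skip_indices: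
--             return ""
--         rank = i - len({j for j in skip_indices if 0 <= j < i})
--         if rank >= len(summaries):
--             return ""
--         s = summaries[rank]
--         if s:
--             if not s.endswith('.'):
--                 s = s + '.'
--             if not s[0].isupper():
--                 s = s[0].upper() + s[1:]
--         return s
--     return [entry(i) for i in range(len(original_texts))]
-- ===== Notes on version B (the rewrite author's own statement) =====
-- stated objective: alternative
-- what changed: B drops A's pre-filled mutable result list and running valid_idx counter: each output position is computed independently in a comprehension, its summary index derived arithmetically as i minus the number of distinct skip indices below i.
import Mathlib
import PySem

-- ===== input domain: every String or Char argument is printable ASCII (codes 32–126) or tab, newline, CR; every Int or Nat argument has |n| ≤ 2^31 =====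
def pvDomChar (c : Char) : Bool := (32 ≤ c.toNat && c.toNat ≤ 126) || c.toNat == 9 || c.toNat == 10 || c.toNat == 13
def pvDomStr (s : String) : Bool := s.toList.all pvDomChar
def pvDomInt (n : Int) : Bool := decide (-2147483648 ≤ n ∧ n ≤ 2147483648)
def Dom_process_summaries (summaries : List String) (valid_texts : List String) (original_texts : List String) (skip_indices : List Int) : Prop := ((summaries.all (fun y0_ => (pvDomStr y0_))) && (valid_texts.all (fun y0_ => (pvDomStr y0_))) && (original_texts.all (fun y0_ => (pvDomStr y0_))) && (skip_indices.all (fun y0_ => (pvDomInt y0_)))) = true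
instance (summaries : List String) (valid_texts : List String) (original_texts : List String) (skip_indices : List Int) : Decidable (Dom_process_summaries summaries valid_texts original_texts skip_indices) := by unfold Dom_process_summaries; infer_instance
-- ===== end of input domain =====

-- B drops A's mutable result list and running valid_idx counter: each position is
-- computed independently, its summary index derived arithmetically as i minus the
-- number of distinct skip indices below i (objective: alternative; no speed claim).

-- Shared formatting step: both Pythons contain the identical formatting code
-- (append '.' if missing, uppercase the first character if it is not uppercase).
-- Exact on the printable-ASCII domain (upperChar = Python's 1-char str.upper there).
def fmtChars (cs : List Char) : List Char :=
  match cs with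
  | [] => cs
  | _ =>
    let cs1 := if ¬ PySem.Chars.endswith cs ['.'] then cs ++ ['.'] else cs
    match cs1 with
    | [] => cs1
    | c :: rest => if ¬ PySem.Chars.isupper c then PySem.Chars.upperChar c :: rest else cs1

def fmtSummary (s : String) : String := String.ofList (fmtChars s.toList)

-- ===== PORT A =====
def process_summaries (summaries : List String) (valid_texts : List String) (original_texts : List String) (skip_indices : List Int) : List String :=
  let result := List.replicate original_texts.length ""
  let st := (PySem.List.pyRange 0 (original_texts.length : Int) 1).foldl
    (fun (st : List String × Int) i =>
      if skip_indices.contains i then st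
      else if st.2 < (summaries.length : Int) then
        let summary := PySem.List.pyGetD summaries st.2 ""
        (PySem.List.pySetD st.1 i (fmtSummary summary), st.2 + 1)
      else st)
    (result, 0)
  st.1

-- ===== PORT B =====
def process_summaries_alt (summaries : List String) (valid_texts : List String) (original_texts : List String) (skip_indices : List Int) : List String :=
  (PySem.List.pyRange 0 (original_texts.length : Int) 1).map (fun i =>
    if skip_indices.contains i then ""
    else
      let rank : Int := i - ((PySem.Set.ofList (skip_indices.filter
        (fun j => decide (0 ≤ j) && decide (j < i)))).length : Int)
      if (summaries.length : Int) ≤ rank then ""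
      else fmtSummary (PySem.List.pyGetD summaries rank ""))

-- ===== PRECONDITION & SPEC =====
def Spec_process_summaries (summaries : List String) (valid_texts : List String) (original_texts : List String) (skip_indices : List Int) (out : List String) : Prop := out = process_summaries_alt summaries valid_texts original_texts skip_indices
instance (summaries : List String) (valid_texts : List String) (original_texts : List String) (skip_indices : List Int) (out : List String) : Decidable (Spec_process_summaries summaries valid_texts original_texts skip_indices out) := by unfold Spec_process_summaries; infer_instance

-- ===== CLAIM (what is proved, stated in full; the proofs are below) =====
def Claim_equal_process_summaries : Prop := ∀ (summaries : List String) (valid_texts : List String) (original_texts : List String) (skip_indices : List Int), Dom_process_summaries summaries valid_texts original_texts skip_indices → Spec_process_summaries summaries valid_texts original_texts skip_indices (process_summaries summaries valid_texts original_texts skip_indices)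

-- ===== LEMMAS AND PROOFS =====

-- Intermediate form shared by both direction lemmas: fold pySetD over the kept
-- indices zipped with the summaries, starting from the all-empty list.
def zipFold (summaries : List String) (skip_indices : List Int) (n : Nat) : List String :=
  (((PySem.List.pyRange 0 (n : Int) 1).filter (fun i => !(skip_indices.contains i))).zip
      summaries).foldl
    (fun res p => PySem.List.pySetD res p.1 (fmtSummary p.2))
    (List.replicate n "")

-- A's loop invariant: the fold over any index list l with state (res, v) equals the
-- zip fold over (filtered l) with the summaries remaining from position v.
theorem loopA_eq_zip (summaries : List String) (skip_indices : List Int)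
    (l : List Int) (res : List String) (v : Int) (hv : 0 ≤ v) :
    (l.foldl
      (fun (st : List String × Int) i =>
        if skip_indices.contains i then st
        else if st.2 < (summaries.length : Int) then
          let summary := PySem.List.pyGetD summaries st.2 ""
          (PySem.List.pySetD st.1 i (fmtSummary summary), st.2 + 1)
        else st)
      (res, v)).1
    = ((l.filter (fun i => !(skip_indices.contains i))).zip (summaries.drop v.toNat)).foldl
        (fun res p => PySem.List.pySetD res p.1 (fmtSummary p.2)) res := by
  induction l generalizing res v with
  | nil => rfl
  | cons i l ih =>
    rw [List.foldl_cons, List.filter_cons]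
    by_cases hs : skip_indices.contains i
    · rw [if_pos hs, if_neg (show ¬ (!skip_indices.contains i) = true by simpa using hs)]
      exact ih res v hv
    · rw [if_neg hs, if_pos (show (!skip_indices.contains i) = true by simpa using hs)]
      by_cases hlt : v < (summaries.length : Int)
      · have hvn : v.toNat < summaries.length := by omega
        have hdrop : summaries.drop v.toNat = summaries[v.toNat] :: summaries.drop (v.toNat + 1) :=
          List.drop_eq_getElem_cons hvn
        have hget : PySem.List.pyGetD summaries v "" = summaries[v.toNat] :=
          PySem.List.pyGetD_eq_getElem summaries "" hv hlt
        have h1 : (v + 1).toNat = v.toNat + 1 := by omega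
        rw [if_pos hlt, hget, hdrop, List.zip_cons_cons, List.foldl_cons]
        have h2 := ih (PySem.List.pySetD res i (fmtSummary summaries[v.toNat])) (v + 1) (by omega)
        rw [h1] at h2
        exact h2
      · have hdrop : summaries.drop v.toNat = [] := by
          apply List.drop_eq_nil_of_le; omega
        have h2 := ih res v hv
        rw [hdrop, List.zip_nil_right, List.foldl_nil] at h2
        rw [if_neg hlt, hdrop, List.zip_nil_right, List.foldl_nil]
        exact h2

-- zip of a snoc: the extra pair appears iff the other list is long enough.
theorem zip_snoc {α β : Type} (l : List α) (a : α) (s : List β) :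
    (l ++ [a]).zip s
      = l.zip s ++ (if h : l.length < s.length then [(a, s[l.length])] else []) := by
  induction l generalizing s with
  | nil =>
    cases s with
    | nil => rfl
    | cons b s => rw [dif_pos (by simp)]; rfl
  | cons x l ih =>
    cases s with
    | nil => rfl
    | cons b s =>
      simp only [List.cons_append, List.zip_cons_cons, List.length_cons]
      rw [ih s]
      by_cases h : l.length < s.length
      · rw [dif_pos h, dif_pos (Nat.succ_lt_succ h)]
        rfl
      · rw [dif_neg h, dif_neg (fun hh => h (Nat.lt_of_succ_lt_succ hh))]

-- pySetD preserves length, so the zip fold does too.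
theorem length_zipfold (zs : List (Int × String)) (res : List String) :
    (zs.foldl (fun res p => PySem.List.pySetD res p.1 (fmtSummary p.2)) res).length
      = res.length := by
  induction zs generalizing res with
  | nil => rfl
  | cons q zs ih => rw [List.foldl_cons, ih, PySem.List.length_pySetD]

-- Sets at indices inside the left part commute with a right append.
theorem zipfold_append (zs : List (Int × String)) (L R : List String)
    (h : ∀ q ∈ zs, 0 ≤ q.1 ∧ q.1 < (L.length : Int)) :
    zs.foldl (fun res p => PySem.List.pySetD res p.1 (fmtSummary p.2)) (L ++ R)
      = zs.foldl (fun res p => PySem.List.pySetD res p.1 (fmtSummary p.2)) L ++ R := by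
  induction zs generalizing L with
  | nil => rfl
  | cons q zs ih =>
    have hq := h q (List.mem_cons_self ..)
    have hset : PySem.List.pySetD (L ++ R) q.1 (fmtSummary q.2)
        = PySem.List.pySetD L q.1 (fmtSummary q.2) ++ R := by
      rw [PySem.List.pySetD_of_nonneg _ _ hq.1, PySem.List.pySetD_of_nonneg _ _ hq.1,
        List.set_append_left _ _ (by omega)]
    rw [List.foldl_cons, List.foldl_cons, hset]
    exact ih _ (fun q hqm => by
      have := h q (List.mem_cons_of_mem _ hqm)
      simpa [PySem.List.length_pySetD] using this)

-- The zip fold equals B's per-index map: induction on n, peeling the last index.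
theorem zip_eq_alt (summaries : List String) (skip_indices : List Int) (n : Nat) :
    zipFold summaries skip_indices n
      = (PySem.List.pyRange 0 (n : Int) 1).map (fun i =>
          if skip_indices.contains i then ""
          else
            let rank := ((PySem.List.pyRange 0 i 1).filter
              (fun j => !(skip_indices.contains j))).length
            if (summaries.length : Int) ≤ (rank : Int) then ""
            else fmtSummary (PySem.List.pyGetD summaries (rank : Int) "")) := by
  induction n with
  | zero => rfl
  | succ n ih =>
    have hrange : PySem.List.pyRange 0 ((n + 1 : Nat) : Int) 1
        = PySem.List.pyRange 0 (n : Int) 1 ++ [(n : Int)] := by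
      have h : ((n + 1 : Nat) : Int) = (n : Int) + 1 := by push_cast; ring
      rw [h, PySem.List.pyRange_one_succ_right (by positivity)]
    have hmemlt : ∀ q ∈ (((PySem.List.pyRange 0 (n : Int) 1).filter
        (fun i => !(skip_indices.contains i))).zip summaries),
        0 ≤ q.1 ∧ q.1 < ((List.replicate n (α := String) "").length : Int) := by
      intro q hq
      have h1 := List.of_mem_zip hq
      have h3 := (PySem.List.mem_pyRange_one).1 (List.mem_of_mem_filter h1.1)
      simpa [List.length_replicate] using h3
    have hrep : List.replicate (n + 1) (α := String) "" = List.replicate n "" ++ [""] :=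
      List.replicate_succ' ..
    have hlenfold : (((PySem.List.pyRange 0 (n : Int) 1).filter
          (fun i => !(skip_indices.contains i))).zip summaries).foldl
            (fun res p => PySem.List.pySetD res p.1 (fmtSummary p.2))
            (List.replicate n "") = zipFold summaries skip_indices n := rfl
    unfold zipFold
    rw [hrange, List.filter_append, hrep, List.map_append, ← ih]
    by_cases hs : skip_indices.contains ((n : Nat) : Int)
    · -- last index skipped: nothing new is zipped, the new cell stays ""
      have hfilt : [((n : Nat) : Int)].filter (fun i => !(skip_indices.contains i)) = [] := by
        rw [List.filter_cons, if_neg (show ¬ (!skip_indices.contains ((n : Nat) : Int)) = true by simpa using hs), List.filter_nil]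
      rw [hfilt, List.append_nil, zipfold_append _ _ _ hmemlt, hlenfold]
      rw [List.map_cons, List.map_nil, if_pos hs]
    · have hfilt : [((n : Nat) : Int)].filter (fun i => !(skip_indices.contains i))
          = [((n : Nat) : Int)] := by
        rw [List.filter_cons, if_pos (show (!skip_indices.contains ((n : Nat) : Int)) = true by simpa using hs), List.filter_nil]
      rw [hfilt, zip_snoc]
      by_cases hlen : ((PySem.List.pyRange 0 ((n : Nat) : Int) 1).filter
          (fun i => !(skip_indices.contains i))).length < summaries.length
      · rw [dif_pos hlen, List.foldl_append, zipfold_append _ _ _ hmemlt, hlenfold,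
          List.foldl_cons, List.foldl_nil]
        have hlenL : (zipFold summaries skip_indices n).length = n := by
          rw [← hlenfold, length_zipfold, List.length_replicate]
        rw [PySem.List.pySetD_natCast, List.set_append_right _ _ (by omega),
          (by omega : n - (zipFold summaries skip_indices n).length = 0),
          List.set_cons_zero]
        rw [List.map_cons, List.map_nil, if_neg hs]
        rw [if_neg (by push_cast; omega : ¬ (summaries.length : Int)
          ≤ ((((PySem.List.pyRange 0 ((n : Nat) : Int) 1).filter
            (fun i => !(skip_indices.contains i))).length : Nat) : Int))]
        rw [PySem.List.pyGetD_natCast, List.getD_eq_getElem _ _ hlen]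
      · rw [dif_neg hlen, List.append_nil, zipfold_append _ _ _ hmemlt, hlenfold]
        rw [List.map_cons, List.map_nil, if_neg hs]
        rw [if_pos (by push_cast; omega : (summaries.length : Int)
          ≤ ((((PySem.List.pyRange 0 ((n : Nat) : Int) 1).filter
            (fun i => !(skip_indices.contains i))).length : Nat) : Int))]

-- On a non-skipped index i, B's arithmetic rank (i minus the number of distinct
-- skip values in [0,i)) equals the count of non-skipped indices below i.
theorem rank_eq (skip_indices : List Int) (i : Int) (hi : 0 ≤ i) :
    i - ((PySem.Set.ofList (skip_indices.filter
        (fun j => decide (0 ≤ j) && decide (j < i)))).length : Int)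
      = (((PySem.List.pyRange 0 i 1).filter
          (fun j => !(skip_indices.contains j))).length : Int) := by
  have hperm : ((PySem.List.pyRange 0 i 1).filter (fun j => skip_indices.contains j)).Perm
      (PySem.Set.ofList (skip_indices.filter (fun j => decide (0 ≤ j) && decide (j < i)))) := by
    rw [List.perm_ext_iff_of_nodup
      ((PySem.List.nodup_pyRange_one 0 i).filter _) (PySem.Set.nodup_ofList _)]
    intro a
    rw [List.mem_filter, PySem.List.mem_pyRange_one, PySem.Set.mem_ofList, List.mem_filter]
    constructor
    · rintro ⟨⟨h0, h1⟩, h2⟩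
      exact ⟨by simpa using h2, by simp [h0, h1]⟩
    · rintro ⟨h2, h01⟩
      simp only [Bool.and_eq_true, decide_eq_true_eq] at h01
      exact ⟨⟨h01.1, h01.2⟩, by simpa using h2⟩
  have hsplit : (PySem.List.pyRange 0 i 1).length
      = ((PySem.List.pyRange 0 i 1).filter (fun j => skip_indices.contains j)).length
      + ((PySem.List.pyRange 0 i 1).filter (fun j => !(skip_indices.contains j))).length :=
    List.length_eq_length_filter_add (fun j => skip_indices.contains j)
  have hlen : (PySem.List.pyRange 0 i 1).length = i.toNat := by
    rw [PySem.List.length_pyRange_one]; omega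
  rw [← hperm.length_eq]
  omega

-- B's map function agrees with the count-based map function on every range index.
theorem alt_map_eq (summaries : List String) (skip_indices : List Int) (n : Nat) :
    (PySem.List.pyRange 0 (n : Int) 1).map (fun i =>
      if skip_indices.contains i then ""
      else
        let rank : Int := i - ((PySem.Set.ofList (skip_indices.filter
          (fun j => decide (0 ≤ j) && decide (j < i)))).length : Int)
        if (summaries.length : Int) ≤ rank then ""
        else fmtSummary (PySem.List.pyGetD summaries rank ""))
    = (PySem.List.pyRange 0 (n : Int) 1).map (fun i =>
      if skip_indices.contains i then ""
      else
        let rank := ((PySem.List.pyRange 0 i 1).filter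
          (fun j => !(skip_indices.contains j))).length
        if (summaries.length : Int) ≤ (rank : Int) then ""
        else fmtSummary (PySem.List.pyGetD summaries (rank : Int) "")) := by
  apply List.map_congr_left
  intro i hi
  have h0 : 0 ≤ i := ((PySem.List.mem_pyRange_one).1 hi).1
  by_cases hs : skip_indices.contains i
  · rw [if_pos hs, if_pos hs]
  · rw [if_neg hs, if_neg hs]
    simp only [rank_eq skip_indices i h0]

-- ===== VERDICT (by name: the statement is the Claim_ definition above) =====
theorem process_summaries_spec : Claim_equal_process_summaries := by
  intro summaries valid_texts original_texts skip_indices _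
  unfold Spec_process_summaries process_summaries process_summaries_alt
  have h1 := loopA_eq_zip summaries skip_indices
    (PySem.List.pyRange 0 (original_texts.length : Int) 1)
    (List.replicate original_texts.length "") 0 le_rfl
  rw [alt_map_eq]
  simpa [zipFold] using h1.trans (zip_eq_alt summaries skip_indices original_texts.length)
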